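-- pv_equiv track=rewrite | github.com/99Cyborgs/SCIR | scripts/scir_bootstrap_pipeline.py | has_nondeterministic_storage_markers
-- ===== SOURCE A (Python) =====
-- def import_sort_key_from_line(line: str) -> tuple[str, str]:
--     fields = line.split()
--     if len(fields) != 4:
--         return ("", "")
--     return fields[1], fields[2]
--
-- def has_nondeterministic_storage_markers(scirh_text: str) -> bool:
--     stripped_lines = [line for line in scirh_text.splitlines() if line.strip()]
--     import_lines = [line for line in stripped_lines if line.startswith("import ")]
--     if import_lines != sorted(import_lines, key=import_sort_key_from_line):
--         return True
--     for line in stripped_lines: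
--         if "->" not in line:
--             continue
--         fields = line.split()
--         if not fields:
--             continue
--         effect_row = fields[-1]
--         if not effect_row.startswith("!"):
--             continue
--         effects = [item for item in effect_row[1:].split(",") if item]
--         if effects != sorted(dict.fromkeys(effects)):
--             return True
--     return False
-- ===== SOURCE B (Python) =====
-- def import_sort_key_from_line(line: str) -> tuple[str, str]:
--     fields = line.split()
--     if len(fields) != 4:
--         return ("", "")
--     return fields[1], fields[2]
--
-- def has_nondeterministic_storage_markers(scirh_text: str) -> bool:
--     # One pass over the lines, no sorted() calls: track the previous import key
--     # and scan adjacent pairs; stable sort order == no adjacent key decrease,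
--     # sorted-deduped equality == strictly increasing adjacent effects.
--     prev_key = None
--     bad = False
--     for line in scirh_text.splitlines():
--         if not line.strip():
--             continue
--         if line.startswith("import "):
--             key = import_sort_key_from_line(line)
--             if prev_key is not None and prev_key > key:
--                 bad = True
--             prev_key = key
--         fields = line.split()
--         if fields and "->" in line and fields[-1].startswith("!"):
--             effects = [e for e in fields[-1][1:].split(",") if e]
--             if any(a >= b for a, b in zip(effects, effects[1:])):
--                 bad = True
--     return bad
-- ===== Notes on version B (the rewrite author's own statement) =====
-- stated objective: alternative
-- what changed: Both sort-then-compare checks are replaced by a single fused pass over the lines that scans adjacent pairs: imports are checked by tracking the previous import key and flagging any key decrease (stable sort fixpoint = adjacent keys non-decreasing), and each effect list is checked by flagging any adjacent pair with a >= b (equal to sorted-dedup fixpoint = strictly increasing); no sorted() or dict.fromkeys() is called.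
import Mathlib
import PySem

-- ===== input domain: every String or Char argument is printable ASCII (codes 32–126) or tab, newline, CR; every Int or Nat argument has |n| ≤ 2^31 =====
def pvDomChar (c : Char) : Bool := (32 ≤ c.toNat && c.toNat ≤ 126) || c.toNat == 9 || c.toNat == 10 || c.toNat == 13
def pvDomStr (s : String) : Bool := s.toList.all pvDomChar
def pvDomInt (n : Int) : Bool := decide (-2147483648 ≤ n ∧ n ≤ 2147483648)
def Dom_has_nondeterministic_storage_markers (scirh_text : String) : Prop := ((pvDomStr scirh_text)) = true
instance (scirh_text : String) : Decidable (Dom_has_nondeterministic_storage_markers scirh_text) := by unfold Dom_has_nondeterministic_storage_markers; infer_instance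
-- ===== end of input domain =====

-- B replaces both "compare with a sorted copy" tests by one fused pass that scans adjacent pairs; same results, no sorted() calls.

-- ===== PORT A =====
def import_sort_key_from_line (line : String) : String × String :=
  let fields := PySem.Str.split₀ line
  if fields.length ≠ 4 then ("", "")
  else ((PySem.List.pyGet? fields 1).getD "", (PySem.List.pyGet? fields 2).getD "")
  -- getD "" is never used: the branch guarantees length 4

-- body of A's "for line in stripped_lines" loop (early 'continue's become 'false')
def effectCheckA (line : String) : Bool :=
  if !(PySem.Str.isIn "->" line) then false
  else
    let fields := PySem.Str.split₀ line
    match PySem.List.pyGet? fields (-1) with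
    | none => false     -- 'if not fields: continue'
    | some effect_row =>
      if !(PySem.Str.startswith effect_row "!") then false
      else
        let effects := ((PySem.Str.split? (PySem.Str.slice effect_row (some 1) none) ",").getD []).filter
          (fun item => item ≠ "")
        decide (effects ≠ PySem.List.sorted (PySem.List.dedup effects) (fun x => x) false)

def has_nondeterministic_storage_markers (scirh_text : String) : Bool :=
  let stripped_lines := (PySem.Str.splitlines scirh_text).filter
    (fun line => PySem.Str.strip line ≠ "")
  let import_lines := stripped_lines.filter (fun line => PySem.Str.startswith line "import ")
  if import_lines ≠ PySem.List.sorted2 import_lines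
      (fun l => (import_sort_key_from_line l).1) (fun l => (import_sort_key_from_line l).2) false
  then true
  else stripped_lines.any effectCheckA

-- ===== PORT B =====
-- Python tuple comparison 'p > k' on pairs of strings, lexicographic
def lexGtKey (p k : String × String) : Bool :=
  decide (k.1 < p.1) || (p.1 == k.1 && decide (k.2 < p.2))

-- body of B's single loop; state = (prev_key, bad)
def altStep (st : Option (String × String) × Bool) (line : String) : Option (String × String) × Bool :=
  if PySem.Str.strip line = "" then st      -- 'if not line.strip(): continue'
  else
    let st1 :=
      if PySem.Str.startswith line "import " then
        let key := import_sort_key_from_line line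
        (some key, st.2 || (match st.1 with | some p => lexGtKey p key | none => false))
      else st
    let fields := PySem.Str.split₀ line
    match fields.getLast? with
    | none => st1                           -- 'fields' empty: guard fails
    | some last =>
      if PySem.Str.isIn "->" line && PySem.Str.startswith last "!" then
        let effects := ((PySem.Str.split? (PySem.Str.slice last (some 1) none) ",").getD []).filter
          (fun e => e ≠ "")
        (st1.1, st1.2 || (List.zip effects (effects.drop 1)).any (fun p => decide (p.2 ≤ p.1)))
      else st1

def has_nondeterministic_storage_markers_alt (scirh_text : String) : Bool :=
  ((PySem.Str.splitlines scirh_text).foldl altStep (none, false)).2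

-- ===== PRECONDITION & SPEC =====
def Spec_has_nondeterministic_storage_markers (scirh_text : String) (out : Bool) : Prop := out = has_nondeterministic_storage_markers_alt scirh_text
instance (scirh_text : String) (out : Bool) : Decidable (Spec_has_nondeterministic_storage_markers scirh_text out) := by unfold Spec_has_nondeterministic_storage_markers; infer_instance

-- ===== CLAIM (what is proved, stated in full; the proofs are below) =====
def Claim_equal_has_nondeterministic_storage_markers : Prop := ∀ (scirh_text : String), Dom_has_nondeterministic_storage_markers scirh_text → Spec_has_nondeterministic_storage_markers scirh_text (has_nondeterministic_storage_markers scirh_text)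

-- ===== LEMMAS AND PROOFS =====


-- helper predicates shared by the lemmas (identical lambdas to the ports)
def keysOf (ls : List String) : List (String × String) :=
  ((ls.filter (fun line => PySem.Str.strip line ≠ "")).filter
    (fun line => PySem.Str.startswith line "import ")).map import_sort_key_from_line

def effectCheckB (line : String) : Bool :=
  match (PySem.Str.split₀ line).getLast? with
  | none => false
  | some last =>
    if PySem.Str.isIn "->" line && PySem.Str.startswith last "!" then
      let effects := ((PySem.Str.split? (PySem.Str.slice last (some 1) none) ",").getD []).filter
        (fun e => e ≠ "")
      (List.zip effects (effects.drop 1)).any (fun p => decide (p.2 ≤ p.1))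
    else false

def olast (p : Option (String × String)) : List (String × String) → Option (String × String)
  | [] => p
  | k :: ks => olast (some k) ks

def importsBad : Option (String × String) → List (String × String) → Bool
  | _, [] => false
  | none, k :: ks => importsBad (some k) ks
  | some p, k :: ks => lexGtKey p k || importsBad (some k) ks

lemma lexGtKey_eq (p k : String × String) :
    lexGtKey p k = decide (toLex k < toLex p) := by
  rcases p with ⟨p1, p2⟩; rcases k with ⟨k1, k2⟩
  rcases lt_trichotomy k1 p1 with h | h | h
  · simp [lexGtKey, Prod.Lex.lt_iff, h]
  · simp [lexGtKey, Prod.Lex.lt_iff, h]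
  · simp [lexGtKey, Prod.Lex.lt_iff, lt_asymm h, ne_of_lt h, (ne_of_lt h).symm]

lemma lexGtKey_false_iff (p k : String × String) :
    lexGtKey p k = false ↔ toLex p ≤ toLex k := by
  rw [lexGtKey_eq, decide_eq_false_iff_not, not_lt]

lemma importsBad_some_false_iff (ks : List (String × String)) (p : String × String) :
    importsBad (some p) ks = false ↔
      List.IsChain (fun a b => toLex a ≤ toLex b) (p :: ks) := by
  induction ks generalizing p with
  | nil => simp [importsBad]
  | cons k ks ih =>
    rw [List.isChain_cons_cons, ← ih k, ← lexGtKey_false_iff]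
    simp [importsBad]

lemma importsBad_none_false_iff (ks : List (String × String)) :
    importsBad none ks = false ↔ List.IsChain (fun a b => toLex a ≤ toLex b) ks := by
  cases ks with
  | nil => simp [importsBad]
  | cons k ks => rw [show importsBad none (k :: ks) = importsBad (some k) ks from rfl,
      importsBad_some_false_iff]

lemma sorted2_eq (xs : List String) (k1 k2 : String → String) :
    PySem.List.sorted2 xs k1 k2 false =
      PySem.List.sorted xs (fun a => toLex (k1 a, k2 a)) false := by
  unfold PySem.List.sorted2 PySem.List.sorted
  simp only [if_neg (by decide : ¬ (false = true))]
  congr 1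
  funext acc x
  congr 1
  funext a b
  rcases lt_trichotomy (k1 a) (k1 b) with h | h | h
  · simp [Prod.Lex.lt_iff, h]
  · simp [Prod.Lex.lt_iff, h]
  · simp [Prod.Lex.lt_iff, h, lt_asymm h, ne_of_gt h]

lemma eq_sorted_iff {α κ : Type} [LinearOrder κ] (xs : List α) (key : α → κ) :
    xs = PySem.List.sorted xs key ↔ List.IsChain (fun a b => key a ≤ key b) xs := by
  haveI : Trans (fun a b => key a ≤ key b) (fun a b => key a ≤ key b)
      (fun a b : α => key a ≤ key b) := ⟨fun h1 h2 => le_trans h1 h2⟩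
  constructor
  · intro h
    rw [List.isChain_iff_pairwise]
    have hp := PySem.List.sorted_pairwise xs key
    rwa [← h] at hp
  · intro h
    rw [List.isChain_iff_pairwise] at h
    exact (PySem.List.sorted_eq_self_of_pairwise xs key h).symm

lemma effects_sorted_iff (xs : List String) :
    xs = PySem.List.sorted (PySem.List.dedup xs) (fun x => x) ↔
      List.IsChain (fun a b : String => a < b) xs := by
  haveI : Trans (fun a b : String => a < b) (fun a b : String => a < b)
      (fun a b : String => a < b) := ⟨fun h1 h2 => lt_trans h1 h2⟩
  constructor
  · intro h
    rw [List.isChain_iff_pairwise]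
    have hp := PySem.List.sorted_ofList_pairwise_lt (κ := String) xs
    rwa [← PySem.List.dedup_eq_ofList, ← h] at hp
  · intro h
    have hp : xs.Pairwise (fun a b : String => a < b) := List.isChain_iff_pairwise.mp h
    have hn : xs.Nodup := hp.imp (fun h => ne_of_lt h)
    have hd : PySem.List.dedup xs = xs := by
      rw [PySem.List.dedup_eq_ofList]; exact PySem.Set.ofList_eq_self_of_nodup xs hn
    exact (PySem.List.sorted_eq_of_perm_of_pairwise_lt _ xs _ (by rw [hd]) hp).symm

lemma zipAny_false_iff (l : List String) :
    ((List.zip l (l.drop 1)).any (fun p => decide (p.2 ≤ p.1)) = false) ↔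
      List.IsChain (fun a b : String => a < b) l := by
  induction l with
  | nil => simp
  | cons a t ih =>
    cases t with
    | nil => simp
    | cons b t' =>
      rw [List.isChain_cons_cons, ← ih]
      simp [List.zip, not_le]

lemma pyGet_neg_one (xs : List String) : PySem.List.pyGet? xs (-1) = xs.getLast? := by
  cases xs with
  | nil => simp [PySem.List.pyGet?, PySem.List.pyIdx?]
  | cons x t =>
    rw [List.getLast?_eq_getElem?]
    simp [PySem.List.pyGet?, PySem.List.pyIdx?]

lemma zipAny_eq_ne_sorted (effects : List String) :
    ((List.zip effects (effects.drop 1)).any (fun p => decide (p.2 ≤ p.1))) =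
      decide (effects ≠ PySem.List.sorted (PySem.List.dedup effects) (fun x => x) false) := by
  by_cases hc : List.IsChain (fun a b : String => a < b) effects
  · rw [(zipAny_false_iff effects).mpr hc]
    exact (decide_eq_false (not_ne_iff.mpr ((effects_sorted_iff effects).mpr hc))).symm
  · have h1 : ((List.zip effects (effects.drop 1)).any (fun p => decide (p.2 ≤ p.1))) = true := by
      rcases Bool.eq_false_or_eq_true ((List.zip effects (effects.drop 1)).any
        (fun p => decide (p.2 ≤ p.1))) with h | h
      · exact h
      · exact absurd ((zipAny_false_iff effects).mp h) hc
    rw [h1]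
    have h2 : effects ≠ PySem.List.sorted (PySem.List.dedup effects) (fun x => x) false := by
      intro h; exact hc ((effects_sorted_iff effects).mp h)
    exact (decide_eq_true h2).symm

lemma effectCheck_eq : effectCheckA = effectCheckB := by
  funext line
  simp only [effectCheckA, effectCheckB, pyGet_neg_one]
  rcases h : (PySem.Str.split₀ line).getLast? with _ | last
  · simp only [h]
    cases hin : PySem.Str.isIn "->" line <;> simp
  · simp only [h]
    cases hin : PySem.Str.isIn "->" line
    · simp
    · cases hst : PySem.Str.startswith last "!"
      · simp
      · rw [zipAny_eq_ne_sorted]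
        try simp


lemma importsBad_cons (prev : Option (String × String)) (k : String × String)
    (ks : List (String × String)) :
    importsBad prev (k :: ks) =
      ((match prev with | some p => lexGtKey p k | none => false) || importsBad (some k) ks) := by
  cases prev <;> simp [importsBad]

lemma altStep_eq (prev : Option (String × String)) (bad : Bool) (l : String)
    (hb : ¬ PySem.Str.strip l = "") :
    altStep (prev, bad) l =
      (if PySem.Str.startswith l "import " then some (import_sort_key_from_line l) else prev,
       (bad || (if PySem.Str.startswith l "import "
          then (match prev with
                | some p => lexGtKey p (import_sort_key_from_line l)
                | none => false)
          else false)) || effectCheckB l) := by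
  unfold altStep effectCheckB
  rw [if_neg hb]
  rcases hl : (PySem.Str.split₀ l).getLast? with _ | last
  · cases him : PySem.Str.startswith l "import " <;> simp [hl]
  · simp only [hl]
    by_cases hc : (PySem.Str.isIn "->" l && PySem.Str.startswith last "!") = true
    · rw [if_pos hc, if_pos hc]
      cases him : PySem.Str.startswith l "import " <;> simp [Bool.or_assoc]
    · rw [if_neg hc, if_neg hc]
      cases him : PySem.Str.startswith l "import " <;> simp

lemma fold_invariant (ls : List String) (prev : Option (String × String)) (bad : Bool) :
    ls.foldl altStep (prev, bad) =
      (olast prev (keysOf ls),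
       bad || importsBad prev (keysOf ls) ||
         (ls.filter (fun line => PySem.Str.strip line ≠ "")).any effectCheckB) := by
  induction ls generalizing prev bad with
  | nil => simp [keysOf, olast, importsBad]
  | cons l ls ih =>
    by_cases hb : PySem.Str.strip l = ""
    · have hstep : altStep (prev, bad) l = (prev, bad) := by simp [altStep, hb]
      simp [List.foldl_cons, hstep, ih, keysOf, hb]
    · rw [List.foldl_cons, altStep_eq prev bad l hb, ih]
      by_cases him : PySem.Str.startswith l "import "
      · have him' : PySem.Chars.startswith l.toList ['i','m','p','o','r','t',' '] = true := by
          simpa using him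
        have hkeys : keysOf (l :: ls) = import_sort_key_from_line l :: keysOf ls := by
          simp [keysOf, hb, him']
        rw [hkeys, importsBad_cons, if_pos him, if_pos him]
        rw [show olast prev (import_sort_key_from_line l :: keysOf ls) =
              olast (some (import_sort_key_from_line l)) (keysOf ls) from rfl]
        rw [List.filter_cons_of_pos (by simpa using hb), List.any_cons]
        refine Prod.ext rfl ?_
        simp only []
        ac_rfl
      · have him' : PySem.Chars.startswith l.toList ['i','m','p','o','r','t',' '] = false := by
          simpa using him
        have hkeys : keysOf (l :: ls) = keysOf ls := by
          simp [keysOf, hb, him']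
        rw [hkeys, if_neg him, if_neg him]
        rw [List.filter_cons_of_pos (by simpa using hb), List.any_cons]
        refine Prod.ext rfl ?_
        simp only []
        ac_rfl

lemma imports_iff (il : List String) :
    (il = PySem.List.sorted2 il (fun l => (import_sort_key_from_line l).1)
        (fun l => (import_sort_key_from_line l).2) false) ↔
      importsBad none (il.map import_sort_key_from_line) = false := by
  rw [sorted2_eq, eq_sorted_iff, importsBad_none_false_iff, List.isChain_map]

-- ===== VERDICT (by name: the statement is the Claim_ definition above) =====
theorem has_nondeterministic_storage_markers_spec : Claim_equal_has_nondeterministic_storage_markers := by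
  intro s _
  unfold Spec_has_nondeterministic_storage_markers
  simp only [has_nondeterministic_storage_markers, has_nondeterministic_storage_markers_alt]
  rw [fold_invariant, ← effectCheck_eq]
  simp only [Bool.false_or, keysOf]
  by_cases h : (((PySem.Str.splitlines s).filter (fun line => PySem.Str.strip line ≠ "")).filter
      (fun line => PySem.Str.startswith line "import ")) =
      PySem.List.sorted2 (((PySem.Str.splitlines s).filter (fun line => PySem.Str.strip line ≠ "")).filter
        (fun line => PySem.Str.startswith line "import "))
        (fun l => (import_sort_key_from_line l).1) (fun l => (import_sort_key_from_line l).2) false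
  · rw [if_neg (not_not_intro h), (imports_iff _).mp h, Bool.false_or]
  · rw [if_pos h]
    have hbad : importsBad none ((((PySem.Str.splitlines s).filter
        (fun line => PySem.Str.strip line ≠ "")).filter
        (fun line => PySem.Str.startswith line "import ")).map import_sort_key_from_line) = true := by
      rcases Bool.eq_false_or_eq_true (importsBad none ((((PySem.Str.splitlines s).filter
          (fun line => PySem.Str.strip line ≠ "")).filter
          (fun line => PySem.Str.startswith line "import ")).map import_sort_key_from_line)) with ht | hf
      · exact ht
      · exact absurd ((imports_iff _).mpr hf) h
    rw [hbad, Bool.true_or]
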